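-- pv_equiv track=rewrite | github.com/JackieMaw/AdventOfCode | python/2021/2021day07a.py | find_smallest_move
-- ===== SOURCE A (Python) =====
-- def calc_fuel(frequencies, position):
--     fuel = 0
--     for i, f in frequencies.items():
--         fuel += abs(i -position) * f
--     return fuel
--
-- def find_smallest_move(frequencies, min, max):
--     min_fuel = 99999999999
--     best_position = 0
--     for position in range(min, max + 1):
--         fuel = calc_fuel(frequencies, position)
--         if (fuel < min_fuel):
--             min_fuel = fuel
--             best_position = position
--     return min_fuel
-- ===== SOURCE B (Python) =====
-- def find_smallest_move(frequencies, min, max):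
--     best = 99999999999
--     if min > max:
--         return best
--     items = sorted(frequencies.items(), key=lambda t: t[0])
--     total = sum(f for _, f in items)
--     fuel = sum(f * abs(i - min) for i, f in items)
--     # left = total weight at positions <= current position (advances with a pointer)
--     left = 0
--     j = 0
--     while j < len(items) and items[j][0] <= min:
--         left += items[j][1]
--         j += 1
--     if fuel < best:
--         best = fuel
--     p = min
--     while p < max:
--         fuel += 2 * left - total
--         p += 1
--         while j < len(items) and items[j][0] <= p:
--             left += items[j][1]
--             j += 1
--         if fuel < best:
--             best = fuel
--     return best
-- ===== Notes on version B (the rewrite author's own statement) =====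
-- stated objective: alternative
-- what changed: Instead of recomputing the full weighted distance sum for every position in the range, B sorts the frequency keys once, computes the fuel at the leftmost position, and sweeps the range updating fuel incrementally via fuel(p+1) = fuel(p) + 2*left - total with a pointer advancing over the sorted keys.
import Mathlib
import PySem

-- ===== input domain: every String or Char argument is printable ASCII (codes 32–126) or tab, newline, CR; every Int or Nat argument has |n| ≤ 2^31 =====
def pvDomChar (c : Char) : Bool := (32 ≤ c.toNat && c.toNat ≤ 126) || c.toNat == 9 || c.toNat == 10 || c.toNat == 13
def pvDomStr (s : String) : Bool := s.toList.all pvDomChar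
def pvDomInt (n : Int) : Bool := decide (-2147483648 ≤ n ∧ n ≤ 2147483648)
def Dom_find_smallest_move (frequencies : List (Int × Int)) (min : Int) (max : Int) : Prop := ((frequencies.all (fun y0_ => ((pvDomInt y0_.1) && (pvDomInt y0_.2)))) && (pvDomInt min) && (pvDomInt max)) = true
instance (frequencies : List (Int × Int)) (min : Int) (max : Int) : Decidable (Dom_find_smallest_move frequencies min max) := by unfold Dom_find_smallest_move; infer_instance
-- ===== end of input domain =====

-- B replaces A's per-position rescan of all frequencies by a one-time sort plus an
-- incremental sweep (fuel(p+1) = fuel(p) + 2*left - total): a different algorithm, same results.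


-- ===== PORT A =====
def calc_fuel (frequencies : List (Int × Int)) (position : Int) : Int :=
  frequencies.foldl (fun fuel q => fuel + |q.1 - position| * q.2) 0

def find_smallest_move (frequencies : List (Int × Int)) (min : Int) (max : Int) : Int :=
  ((PySem.List.pyRange min (max + 1) 1).foldl
    (fun (st : Int × Int) position =>
      let fuel := calc_fuel frequencies position
      if fuel < st.1 then (fuel, position) else st)
    (99999999999, 0)).1

-- ===== PORT B =====
-- pointer advance 'while j < len(items) and items[j][0] <= p' (the suffix items[j:] is `rest`)
def pvConsumeLe (c : Int) (left : Int) (rest : List (Int × Int)) : Int × List (Int × Int) :=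
  match rest with
  | [] => (left, [])
  | (i, f) :: t => if i ≤ c then pvConsumeLe c (left + f) t else (left, (i, f) :: t)

-- 'while p < max' sweep; n = number of remaining steps (max - p)
def pvSweep (total : Int) : Nat → Int → Int → Int → List (Int × Int) → Int → Int
  | 0, _, _, _, _, best => best
  | n + 1, p, fuel, left, rest, best =>
      let fuel' := fuel + 2 * left - total
      let lr := pvConsumeLe (p + 1) left rest
      let best' := if fuel' < best then fuel' else best
      pvSweep total n (p + 1) fuel' lr.1 lr.2 best'

def find_smallest_move_alt (frequencies : List (Int × Int)) (min : Int) (max : Int) : Int :=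
  if min > max then 99999999999
  else
    let items := PySem.List.sorted frequencies (fun t => t.1) false
    let total := items.foldl (fun s q => s + q.2) 0
    let fuel0 := items.foldl (fun s q => s + q.2 * |q.1 - min|) 0
    let lr := pvConsumeLe min 0 items
    let best0 := if fuel0 < 99999999999 then fuel0 else (99999999999 : Int)
    pvSweep total (max - min).toNat min fuel0 lr.1 lr.2 best0

-- ===== PRECONDITION & SPEC =====
def Spec_find_smallest_move (frequencies : List (Int × Int)) (min : Int) (max : Int) (out : Int) : Prop := out = find_smallest_move_alt frequencies min max
instance (frequencies : List (Int × Int)) (min : Int) (max : Int) (out : Int) : Decidable (Spec_find_smallest_move frequencies min max out) := by unfold Spec_find_smallest_move; infer_instance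

-- ===== CLAIM (what is proved, stated in full; the proofs are below) =====
def Claim_equal_find_smallest_move : Prop := ∀ (frequencies : List (Int × Int)) (min : Int) (max : Int), Dom_find_smallest_move frequencies min max → Spec_find_smallest_move frequencies min max (find_smallest_move frequencies min max)

-- ===== LEMMAS AND PROOFS =====

-- canonical total fuel at a position, total weight, and weight at positions ≤ c
def pvS (l : List (Int × Int)) (p : Int) : Int := (l.map (fun q => |q.1 - p| * q.2)).sum
def pvT (l : List (Int × Int)) : Int := (l.map (·.2)).sum
def pvL (l : List (Int × Int)) (c : Int) : Int := pvT (l.filter (fun q => decide (q.1 ≤ c)))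

theorem pv_foldA_sum (l : List (Int × Int)) (p : Int) : ∀ init : Int,
    l.foldl (fun fuel q => fuel + |q.1 - p| * q.2) init = init + pvS l p := by
  induction l with
  | nil => intro init; simp [pvS]
  | cons q t ih => intro init; simp only [List.foldl_cons, ih, pvS, List.map_cons, List.sum_cons]; ring

theorem pv_foldB_sum (l : List (Int × Int)) (p : Int) : ∀ init : Int,
    l.foldl (fun s q => s + q.2 * |q.1 - p|) init = init + pvS l p := by
  induction l with
  | nil => intro init; simp [pvS]
  | cons q t ih => intro init; simp only [List.foldl_cons, ih, pvS, List.map_cons, List.sum_cons]; ring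

theorem pv_foldT (l : List (Int × Int)) : ∀ init : Int,
    l.foldl (fun s q => s + q.2) init = init + pvT l := by
  induction l with
  | nil => intro init; simp [pvT]
  | cons q t ih => intro init; simp only [List.foldl_cons, ih, pvT, List.map_cons, List.sum_cons]; ring

theorem pv_calc_fuel_eq (l : List (Int × Int)) (p : Int) : calc_fuel l p = pvS l p := by
  simpa using pv_foldA_sum l p 0

theorem pv_fstFold (c : Int → Int) : ∀ (ps : List Int) (m b : Int),
    ((ps.foldl (fun (st : Int × Int) pos =>
        let fuel := c pos; if fuel < st.1 then (fuel, pos) else st) (m, b)).1)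
      = ps.foldl (fun m pos => if c pos < m then c pos else m) m := by
  intro ps
  induction ps with
  | nil => intro m b; rfl
  | cons x t ih =>
    intro m b
    simp only [List.foldl_cons]
    by_cases h : c x < m
    · simp [h, ih]
    · simp [h, ih]

theorem pvS_succ (l : List (Int × Int)) (p : Int) :
    pvS l (p + 1) = pvS l p + 2 * pvL l p - pvT l := by
  induction l with
  | nil => simp [pvS, pvL, pvT]
  | cons q t ih =>
    obtain ⟨i, f⟩ := q
    by_cases h : i ≤ p
    · have h1 : |i - (p + 1)| = p + 1 - i := by rw [abs_of_nonpos (by omega)]; ring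
      have h2 : |i - p| = p - i := by rw [abs_of_nonpos (by omega)]; ring
      simp [pvS, pvL, pvT, h, h1, h2] at ih ⊢
      linarith
    · have h1 : |i - (p + 1)| = i - (p + 1) := abs_of_nonneg (by omega)
      have h2 : |i - p| = i - p := abs_of_nonneg (by omega)
      simp [pvS, pvL, pvT, h, h1, h2] at ih ⊢
      linarith

theorem pv_consume_spec (c : Int) : ∀ (rest : List (Int × Int)),
    rest.Pairwise (fun a b => a.1 ≤ b.1) → ∀ left : Int,
    pvConsumeLe c left rest
      = (left + pvT (rest.filter (fun q => decide (q.1 ≤ c))),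
         rest.filter (fun q => decide (c < q.1))) := by
  intro rest
  induction rest with
  | nil => intro _ left; simp [pvConsumeLe, pvT]
  | cons q t ih =>
    intro hp left
    obtain ⟨i, f⟩ := q
    have hall : ∀ b ∈ t, i ≤ b.1 := by
      intro b hb; exact (List.pairwise_cons.mp hp).1 b hb
    have ht : t.Pairwise (fun a b => a.1 ≤ b.1) := (List.pairwise_cons.mp hp).2
    by_cases h : i ≤ c
    · have hnc : ¬ c < i := by omega
      simp [pvConsumeLe, h, hnc, ih ht, pvT]
      ring
    · have hc : c < i := by omega
      have h1 : t.filter (fun q => decide (q.1 ≤ c)) = [] := by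
        rw [List.filter_eq_nil_iff]; intro b hb; simp only [decide_eq_true_eq]
        have := hall b hb; omega
      have h2 : t.filter (fun q => decide (c < q.1)) = t := by
        rw [List.filter_eq_self]; intro b hb; simp only [decide_eq_true_eq]
        have := hall b hb; omega
      simp [pvConsumeLe, h, hc, h1, h2, pvT]

theorem pvT_perm {l₁ l₂ : List (Int × Int)} (h : l₁.Perm l₂) : pvT l₁ = pvT l₂ :=
  (h.map _).sum_eq

theorem pv_step_a (l : List (Int × Int)) (p : Int) :
    pvT ((l.filter (fun q => decide (p < q.1))).filter (fun q => decide (q.1 ≤ p + 1)))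
      = pvL l (p + 1) - pvL l p := by
  induction l with
  | nil => simp [pvL, pvT]
  | cons q t ih =>
    obtain ⟨i, f⟩ := q
    by_cases h1 : i ≤ p
    · have h2 : i ≤ p + 1 := by omega
      have h3 : ¬ p < i := by omega
      simp [pvL, pvT, h1, h2, h3] at ih ⊢
      linarith
    · by_cases h2 : i ≤ p + 1
      · have h3 : p < i := by omega
        simp [pvL, pvT, h1, h2, h3] at ih ⊢
        linarith
      · have h3 : p < i := by omega
        simp [pvL, pvT, h1, h2, h3] at ih ⊢
        linarith

theorem pv_step_b (l : List (Int × Int)) (p : Int) :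
    (l.filter (fun q => decide (p < q.1))).filter (fun q => decide (p + 1 < q.1))
      = l.filter (fun q => decide (p + 1 < q.1)) := by
  induction l with
  | nil => simp
  | cons q t ih =>
    obtain ⟨i, f⟩ := q
    by_cases h1 : p < i
    · by_cases h2 : p + 1 < i
      · simp [h1, h2, ih]
      · simp [h1, h2, ih]
    · have h2 : ¬ p + 1 < i := by omega
      simp [h1, h2, ih]

theorem pv_sweep_eq (l : List (Int × Int)) : ∀ (n : Nat) (p best : Int) (rest : List (Int × Int)),
    rest.Pairwise (fun a b => a.1 ≤ b.1) →
    rest.Perm (l.filter (fun q => decide (p < q.1))) →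
    pvSweep (pvT l) n p (pvS l p) (pvL l p) rest best
      = (PySem.List.pyRange (p + 1) (p + 1 + (n : Int)) 1).foldl
          (fun m pos => if pvS l pos < m then pvS l pos else m) best := by
  intro n
  induction n with
  | zero =>
    intro p best rest _ _
    rw [show PySem.List.pyRange (p + 1) (p + 1 + ((0 : Nat) : Int)) 1 = [] from
      PySem.List.pyRange_one_eq_nil (by push_cast; omega)]
    rfl
  | succ n ih =>
    intro p best rest hsort hperm
    have hfuel : pvS l p + 2 * pvL l p - pvT l = pvS l (p + 1) := (pvS_succ l p).symm
    have hcons := pv_consume_spec (p + 1) rest hsort (pvL l p)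
    have hleft : pvL l p + pvT (rest.filter (fun q => decide (q.1 ≤ p + 1))) = pvL l (p + 1) := by
      have hpf : (rest.filter (fun q => decide (q.1 ≤ p + 1))).Perm
          ((l.filter (fun q => decide (p < q.1))).filter (fun q => decide (q.1 ≤ p + 1))) :=
        hperm.filter _
      rw [pvT_perm hpf, pv_step_a]; ring
    have hrest : (rest.filter (fun q => decide (p + 1 < q.1))).Perm
        (l.filter (fun q => decide (p + 1 < q.1))) := by
      have := hperm.filter (fun q => decide (p + 1 < q.1))
      rwa [pv_step_b] at this
    have hsort' : (rest.filter (fun q => decide (p + 1 < q.1))).Pairwise (fun a b => a.1 ≤ b.1) :=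
      hsort.filter _
    have hlt : p + 1 < p + 1 + ((n : Int) + 1) := by omega
    have hrange : PySem.List.pyRange (p + 1) (p + 1 + ((n : Int) + 1)) 1
        = (p + 1) :: PySem.List.pyRange (p + 1 + 1) (p + 1 + ((n : Int) + 1)) 1 :=
      PySem.List.pyRange_one_cons hlt
    have hbound : p + 1 + ((n : Int) + 1) = (p + 1) + 1 + (n : Int) := by ring
    simp only [pvSweep, hcons, hfuel, hleft]
    rw [ih (p + 1) _ _ hsort' hrest]
    push_cast
    rw [hrange, hbound, List.foldl_cons]

-- ===== VERDICT (by name: the statement is the Claim_ definition above) =====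
theorem find_smallest_move_spec : Claim_equal_find_smallest_move := by
  intro freq mn mx _
  unfold Spec_find_smallest_move find_smallest_move find_smallest_move_alt
  by_cases h : mn > mx
  · rw [PySem.List.pyRange_one_eq_nil (by omega), if_pos h]
    rfl
  · rw [if_neg h]
    have hle : mn ≤ mx := by omega
    have hperm : (PySem.List.sorted freq (fun t => t.1) false).Perm freq :=
      PySem.List.sorted_perm freq (fun t => t.1) false
    have hsort : (PySem.List.sorted freq (fun t => t.1) false).Pairwise (fun a b => a.1 ≤ b.1) :=
      PySem.List.sorted_pairwise freq (fun t => t.1)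
    set items := PySem.List.sorted freq (fun t => t.1) false with hitems
    have hT : pvT items = pvT freq := pvT_perm hperm
    have hS0 : pvS items mn = pvS freq mn := (hperm.map _).sum_eq
    have hL0 : pvT (items.filter (fun q => decide (q.1 ≤ mn))) = pvL freq mn :=
      pvT_perm (hperm.filter _)
    have hrest0 : (items.filter (fun q => decide (mn < q.1))).Perm
        (freq.filter (fun q => decide (mn < q.1))) := hperm.filter _
    have hsort0 : (items.filter (fun q => decide (mn < q.1))).Pairwise (fun a b => a.1 ≤ b.1) :=
      hsort.filter _
    rw [pv_fstFold (calc_fuel freq) _ 99999999999 0]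
    simp only [pv_calc_fuel_eq, pv_foldT, pv_foldB_sum,
      pv_consume_spec mn items hsort, zero_add, hT, hS0, hL0]
    rw [pv_sweep_eq freq ((mx - mn).toNat) mn _ _ hsort0 hrest0]
    have hn : mn + 1 + (((mx - mn).toNat : Nat) : Int) = mx + 1 := by
      rw [Int.toNat_of_nonneg (by omega)]; ring
    rw [hn, PySem.List.pyRange_one_cons (by omega : mn < mx + 1), List.foldl_cons]
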